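-- pv_equiv track=rewrite | github.com/amindadgar/Evolutionary-Computing | HW4/generate_population_scripts.py | find_depot_using
-- ===== SOURCE A (Python) =====
-- def find_depot_using(chromosome, depot_symbols_arr):
--     """
--     find the depot that the vehicle is using
--
--     """
--     ## to check the chromsome is whether using one or more depots
--     depot_count = 0
--
--     ## find the depot, related to the chromosome
--     depot_symbol = None
--     for depot in depot_symbols_arr:
--         depot_symbol_availability = chromosome.find(depot)
--         ## if it was available, then put the depot symbol
--         if depot_symbol_availability != -1:
--             depot_count += 1
--             # if depot_count > 1:
--             #     raise ValueError(f"Chromsome is using more than one depot!, the last found depot is: {depot}")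
--             depot_symbol = depot
--
--     return depot_symbol
-- ===== SOURCE B (Python) =====
-- def find_depot_using(chromosome, depot_symbols_arr):
--     """find the depot that the vehicle is using"""
--     for depot in reversed(depot_symbols_arr):
--         if depot in chromosome:
--             return depot
--     return None
-- ===== Notes on version B (the rewrite author's own statement) =====
-- stated objective: idiomatic
-- what changed: Replaces the full forward scan that overwrites a last-found variable (and a dead counter) with a reverse scan that early-returns the first depot contained in the chromosome via 'in'.
import Mathlib
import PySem

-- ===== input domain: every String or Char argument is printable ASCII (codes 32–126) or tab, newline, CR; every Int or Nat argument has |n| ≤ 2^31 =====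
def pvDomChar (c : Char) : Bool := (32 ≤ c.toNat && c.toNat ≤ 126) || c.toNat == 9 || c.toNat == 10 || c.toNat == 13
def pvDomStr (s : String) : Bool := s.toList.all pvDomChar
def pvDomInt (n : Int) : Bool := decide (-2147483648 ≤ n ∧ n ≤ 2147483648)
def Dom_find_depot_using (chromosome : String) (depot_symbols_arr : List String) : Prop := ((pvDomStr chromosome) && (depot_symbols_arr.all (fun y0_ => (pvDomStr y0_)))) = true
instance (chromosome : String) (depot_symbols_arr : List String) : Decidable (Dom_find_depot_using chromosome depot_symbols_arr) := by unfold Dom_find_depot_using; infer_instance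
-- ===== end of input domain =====

-- B replaces A's forward scan with an overwritten last-match variable by a reverse scan that
-- returns the first depot contained in the chromosome (idiomatic; same result, same cost).


-- ===== PORT A =====
-- Port of A: fold over the depot list keeping (depot_count, depot_symbol) exactly as the Python loop does.
def find_depot_using (chromosome : String) (depot_symbols_arr : List String) : Option String :=
  (depot_symbols_arr.foldl
    (fun (st : Int × Option String) depot =>
      let depot_symbol_availability := PySem.Str.find chromosome depot
      if depot_symbol_availability ≠ -1 then (st.1 + 1, some depot) else st)
    (0, none)).2

-- ===== PORT B =====
-- Port of B: scan the reversed list, return the first depot contained in the chromosome.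
def findDepotRev (chromosome : String) : List String → Option String
  | [] => none
  | depot :: rest =>
      if PySem.Str.isIn depot chromosome then some depot else findDepotRev chromosome rest

def find_depot_using_alt (chromosome : String) (depot_symbols_arr : List String) : Option String :=
  findDepotRev chromosome depot_symbols_arr.reverse

-- ===== PRECONDITION & SPEC =====
def Spec_find_depot_using (chromosome : String) (depot_symbols_arr : List String) (out : Option String) : Prop := out = find_depot_using_alt chromosome depot_symbols_arr
instance (chromosome : String) (depot_symbols_arr : List String) (out : Option String) : Decidable (Spec_find_depot_using chromosome depot_symbols_arr out) := by unfold Spec_find_depot_using; infer_instance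

-- ===== CLAIM (what is proved, stated in full; the proofs are below) =====
def Claim_equal_find_depot_using : Prop := ∀ (chromosome : String) (depot_symbols_arr : List String), Dom_find_depot_using chromosome depot_symbols_arr → Spec_find_depot_using chromosome depot_symbols_arr (find_depot_using chromosome depot_symbols_arr)

-- ===== LEMMAS AND PROOFS =====
lemma findDepotRev_append (c : String) (xs : List String) (d : String) :
    findDepotRev c (xs ++ [d]) =
      (findDepotRev c xs).or (if PySem.Str.isIn d c then some d else none) := by
  induction xs with
  | nil => cases h : PySem.Chars.isIn d.toList c.toList <;> simp [findDepotRev, h, Option.or]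
  | cons x rest ih =>
      simp only [List.cons_append, findDepotRev]
      split <;> simp [ih, Option.or]

lemma isIn_eq_find_ne (c d : String) :
    PySem.Str.isIn d c = true ↔ PySem.Str.find c d ≠ -1 := by
  rw [PySem.Str.isIn_iff_infix, PySem.Str.find_ne_neg_one_iff]

lemma foldl_eq_rev (c : String) (l : List String) (cnt : Int) (s0 : Option String) :
    (l.foldl
      (fun (st : Int × Option String) depot =>
        let a := PySem.Str.find c depot
        if a ≠ -1 then (st.1 + 1, some depot) else st)
      (cnt, s0)).2 = (findDepotRev c l.reverse).or s0 := by
  induction l generalizing cnt s0 with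
  | nil => simp [findDepotRev, Option.or]
  | cons d rest ih =>
      simp only [List.foldl_cons, List.reverse_cons, findDepotRev_append]
      by_cases h : PySem.Str.find c d ≠ -1
      · have hin : PySem.Str.isIn d c = true := (isIn_eq_find_ne c d).mpr h
        simp only [ih]
        rw [if_pos h, if_pos hin]
        cases findDepotRev c rest.reverse <;> simp [Option.or]
      · have hin : PySem.Str.isIn d c = false := by
          rw [Bool.eq_false_iff, Ne, isIn_eq_find_ne]; simpa using h
        simp only [ih]
        rw [if_neg h, if_neg (by rw [hin]; simp)]
        cases findDepotRev c rest.reverse <;> simp [Option.or]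

-- ===== VERDICT (by name: the statement is the Claim_ definition above) =====
theorem find_depot_using_spec : Claim_equal_find_depot_using := by
  intro c arr _
  show find_depot_using c arr = find_depot_using_alt c arr
  unfold find_depot_using find_depot_using_alt
  rw [foldl_eq_rev]
  cases findDepotRev c arr.reverse <;> simp [Option.or]
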